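-- pv_equiv track=rewrite | github.com/blackducksoftware/suite-migration-tools | code_center_component_import.py | _reconcile_component_approvals
-- ===== SOURCE A (Python) =====
-- class ApprovalStatusConflict(Exception):
-- 	pass
--
-- def _reconcile_component_approvals(component_name_and_version, component_approvals):
-- 	# Given a list of component approvals (for the same component/name), determine if there is
-- 	# any conflict in the approval status values and, if not, choose an appropriate record
-- 	# to use for updating the Hub.
-- 	# Note that Protex/CC status values of 'PENDING', 'MOREINFO', 'NOTSUBMITTED' all map to UNREVIEWED
-- 	statuses = set([c['approval_status'] for c in component_approvals])
-- 	if 'REJECTED' in statuses and 'APPROVED' in statuses: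
-- 		raise ApprovalStatusConflict("component {} has conflicting status values ({})".format(
-- 			component_name_and_version, component_approvals))
-- 	elif 'APPROVED' in statuses:
-- 		# Choose the first APPROVED
-- 		suite_component_info = list(filter(
-- 			lambda ca: ca['approval_status'] == 'APPROVED', component_approvals))[0]
-- 	elif 'REJECTED' in statuses:
-- 		# Choose the first REJECTED
-- 		suite_component_info = list(filter(
-- 			lambda ca: ca['approval_status'] == 'REJECTED', component_approvals))[0]
-- 	else:
-- 		# Choose the first in the list
-- 		suite_component_info = component_approvals[0]
-- 	return suite_component_info
-- ===== SOURCE B (Python) =====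
-- class ApprovalStatusConflict(Exception):
-- 	pass
--
-- def _reconcile_component_approvals(component_name_and_version, component_approvals):
-- 	# Priority sort: APPROVED < REJECTED < anything else; the sort is stable, so the
-- 	# head of the sorted list is the record to return.  In the sorted rank sequence a
-- 	# conflict (both APPROVED and REJECTED present) shows up as an adjacent (0, 1) pair.
-- 	RANK = {'APPROVED': 0, 'REJECTED': 1}
-- 	ordered = sorted(component_approvals,
-- 		key=lambda ca: RANK.get(ca['approval_status'], 2))
-- 	ranks = [RANK.get(ca['approval_status'], 2) for ca in ordered]
-- 	if any(a == 0 and b == 1 for a, b in zip(ranks, ranks[1:])):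
-- 		raise ApprovalStatusConflict("component {} has conflicting status values ({})".format(
-- 			component_name_and_version, component_approvals))
-- 	return ordered[0]
-- ===== Notes on version B (the rewrite author's own statement) =====
-- stated objective: alternative
-- what changed: Replaces the status-set plus per-status filter passes with a priority-sort algorithm: stably sort the records by rank (APPROVED=0, REJECTED=1, other=2) and return the head; a conflict is detected as an adjacent (0,1) pair in the sorted rank sequence.
import Mathlib
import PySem

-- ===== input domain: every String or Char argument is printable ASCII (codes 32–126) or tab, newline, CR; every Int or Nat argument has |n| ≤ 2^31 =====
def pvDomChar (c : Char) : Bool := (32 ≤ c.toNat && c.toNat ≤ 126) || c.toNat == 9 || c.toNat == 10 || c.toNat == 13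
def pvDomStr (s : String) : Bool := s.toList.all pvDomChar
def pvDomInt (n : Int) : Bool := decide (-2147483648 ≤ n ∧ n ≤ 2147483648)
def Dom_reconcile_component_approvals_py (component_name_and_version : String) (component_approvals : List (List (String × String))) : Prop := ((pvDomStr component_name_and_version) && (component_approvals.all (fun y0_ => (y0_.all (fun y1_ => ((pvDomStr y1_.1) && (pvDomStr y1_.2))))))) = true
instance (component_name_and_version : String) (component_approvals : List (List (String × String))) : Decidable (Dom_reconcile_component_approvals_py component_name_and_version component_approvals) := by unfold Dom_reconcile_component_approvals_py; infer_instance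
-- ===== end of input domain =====

-- B replaces A's status-set plus per-status filter passes by a priority-sort algorithm
-- (stable sort by rank APPROVED=0 < REJECTED=1 < other=2, return the head; a conflict is an
-- adjacent (0,1) pair in the sorted rank sequence); objective: alternative.

-- shared helper: ca['approval_status'] (first-match dict lookup; key present under Pre_)
def pvStatus (ca : List (String × String)) : String :=
  (PySem.Dict.mk ca).getD "approval_status" ""

-- ===== PORT A =====
def reconcile_component_approvals_py (component_name_and_version : String) (component_approvals : List (List (String × String))) : List (String × String) :=
  let statuses : PySem.Set String := PySem.Set.ofList (component_approvals.map pvStatus)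
  if statuses.contains "REJECTED" && statuses.contains "APPROVED" then
    []  -- Python raises ApprovalStatusConflict here; excluded by Pre_
  else if statuses.contains "APPROVED" then
    PySem.List.pyGetD (component_approvals.filter (fun ca => pvStatus ca == "APPROVED")) 0 []
  else if statuses.contains "REJECTED" then
    PySem.List.pyGetD (component_approvals.filter (fun ca => pvStatus ca == "REJECTED")) 0 []
  else
    PySem.List.pyGetD component_approvals 0 []  -- IndexError on []; excluded by Pre_

-- ===== PORT B =====
-- RANK.get(ca['approval_status'], 2)
def pvRankOf (ca : List (String × String)) : Int :=
  (PySem.Dict.mk [("APPROVED", (0 : Int)), ("REJECTED", 1)]).getD (pvStatus ca) 2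

def reconcile_component_approvals_py_alt (component_name_and_version : String) (component_approvals : List (List (String × String))) : List (String × String) :=
  let ordered := PySem.List.sorted component_approvals (fun ca => pvRankOf ca)
  let ranks := ordered.map (fun ca => pvRankOf ca)
  if (ranks.zip (PySem.List.slice ranks (some 1) none)).any
       (fun p => p.1 == 0 && p.2 == 1) then
    []  -- Python raises ApprovalStatusConflict here; excluded by Pre_
  else
    PySem.List.pyGetD ordered 0 []  -- IndexError on []; excluded by Pre_

-- ===== PRECONDITION & SPEC =====
-- Pre_ excludes exactly the inputs where the Python A raises: the empty list (IndexError),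
-- a record missing the 'approval_status' key (KeyError), and lists containing both an
-- APPROVED and a REJECTED record (ApprovalStatusConflict).
def Pre_reconcile_component_approvals_py (component_name_and_version : String) (component_approvals : List (List (String × String))) : Prop :=
  component_approvals ≠ [] ∧
  (∀ ca ∈ component_approvals, (PySem.Dict.mk ca).contains "approval_status" = true) ∧
  ¬((∃ ca ∈ component_approvals, pvStatus ca = "APPROVED") ∧
    (∃ ca ∈ component_approvals, pvStatus ca = "REJECTED"))
instance (component_name_and_version : String) (component_approvals : List (List (String × String))) : Decidable (Pre_reconcile_component_approvals_py component_name_and_version component_approvals) := by unfold Pre_reconcile_component_approvals_py; infer_instance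

def pvWitness_reconcile_component_approvals_py : String × (List (List (String × String))) :=
  ("foo 1.0", [[("approval_status", "PENDING")], [("approval_status", "APPROVED"), ("id", "2")]])

def Spec_reconcile_component_approvals_py (component_name_and_version : String) (component_approvals : List (List (String × String))) (out : List (String × String)) : Prop := out = reconcile_component_approvals_py_alt component_name_and_version component_approvals
instance (component_name_and_version : String) (component_approvals : List (List (String × String))) (out : List (String × String)) : Decidable (Spec_reconcile_component_approvals_py component_name_and_version component_approvals out) := by unfold Spec_reconcile_component_approvals_py; infer_instance

-- ===== CLAIM (what is proved, stated in full; the proofs are below) =====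
def Claim_equal_reconcile_component_approvals_py : Prop := ∀ (component_name_and_version : String) (component_approvals : List (List (String × String))), Dom_reconcile_component_approvals_py component_name_and_version component_approvals → Pre_reconcile_component_approvals_py component_name_and_version component_approvals → Spec_reconcile_component_approvals_py component_name_and_version component_approvals (reconcile_component_approvals_py component_name_and_version component_approvals)

-- ===== LEMMAS AND PROOFS =====

-- the rank dictionary lookup, spelled out
theorem pvRankOf_eq (ca : List (String × String)) :
    pvRankOf ca = if pvStatus ca = "APPROVED" then 0
                  else if pvStatus ca = "REJECTED" then 1 else 2 := by
  unfold pvRankOf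
  by_cases h1 : pvStatus ca = "APPROVED"
  · simp [PySem.Dict.getD, PySem.Dict.get?, List.find?, h1]
  · have e1 : ("APPROVED" == pvStatus ca) = false :=
      beq_eq_false_iff_ne.mpr (fun h => h1 h.symm)
    by_cases h2 : pvStatus ca = "REJECTED"
    · simp [PySem.Dict.getD, PySem.Dict.get?, List.find?, e1, h2, h1]
    · have e2 : ("REJECTED" == pvStatus ca) = false :=
        beq_eq_false_iff_ne.mpr (fun h => h2 h.symm)
      simp [PySem.Dict.getD, PySem.Dict.get?, List.find?, e1, e2, h1, h2]

theorem pvRankOf_cases (ca : List (String × String)) :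
    pvRankOf ca = 0 ∨ pvRankOf ca = 1 ∨ pvRankOf ca = 2 := by
  rw [pvRankOf_eq]; split_ifs <;> simp

theorem pvRankOf_eq_zero_iff (ca : List (String × String)) :
    pvRankOf ca = 0 ↔ pvStatus ca = "APPROVED" := by
  rw [pvRankOf_eq]
  by_cases h1 : pvStatus ca = "APPROVED"
  · simp [h1]
  · by_cases h2 : pvStatus ca = "REJECTED" <;> simp [h1, h2]

theorem pvRankOf_eq_one_iff (ca : List (String × String)) :
    pvRankOf ca = 1 ↔ pvStatus ca = "REJECTED" := by
  rw [pvRankOf_eq]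
  by_cases h1 : pvStatus ca = "APPROVED"
  · simp [h1]
  · by_cases h2 : pvStatus ca = "REJECTED" <;> simp [h1, h2]

-- insertBy, unfolded (definitional)
theorem pv_insertBy_cons {α : Type} (before : α → α → Bool) (x y : α) (t : List α) :
    PySem.List.insertBy before x (y :: t) =
      if before x y then x :: y :: t else y :: PySem.List.insertBy before x t := rfl

-- the running strict-min fold (first element of minimal key)
def pvRunMin {α : Type} (key : α → Int) (h : α) (l : List α) : α :=
  l.foldl (fun b x => if key x < key b then x else b) h

-- head of the insertion-sort fold is the running strict-min of the inputs
theorem pv_foldl_insertBy_head {α : Type} (key : α → Int) (l : List α) (h : α) (t : List α) :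
    ∃ t', l.foldl (fun acc x => PySem.List.insertBy (fun a b => decide (key a < key b)) x acc) (h :: t)
            = pvRunMin key h l :: t' := by
  induction l generalizing h t with
  | nil => exact ⟨t, rfl⟩
  | cons x xs ih =>
    simp only [List.foldl_cons, pv_insertBy_cons, pvRunMin]
    by_cases hx : key x < key h
    · simpa [hx, pvRunMin] using ih x (h :: t)
    · simpa [hx, pvRunMin] using ih h (PySem.List.insertBy (fun a b => decide (key a < key b)) x t)

theorem pv_sorted_cons_head {α : Type} (key : α → Int) (x : α) (xs : List α) :
    ∃ t', PySem.List.sorted (x :: xs) (fun y => key y) = pvRunMin key x xs :: t' := by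
  rw [PySem.List.sorted_eq_foldl_insertBy]
  simpa using pv_foldl_insertBy_head key xs x []

-- the running strict-min is the FIRST element with the smaller of two possible key values
theorem pv_runMin_first {α : Type} (key : α → Int) (v w : Int) (hvw : v < w) :
    ∀ (l : List α) (h : α), (key h = v ∨ key h = w) → (∀ y ∈ l, key y = v ∨ key y = w) →
      pvRunMin key h l = if key h = v then h else (l.find? (fun y => key y == v)).getD h := by
  intro l
  induction l with
  | nil =>
    intro h _ _
    unfold pvRunMin
    simp only [List.foldl_nil, List.find?_nil, Option.getD_none]
    split_ifs <;> rfl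
  | cons x xs ih =>
    intro h hh hl
    have hx := hl x (by simp)
    have hxs : ∀ y ∈ xs, key y = v ∨ key y = w := fun y hy => hl y (by simp [hy])
    unfold pvRunMin
    simp only [List.foldl_cons]
    rcases hh with hh | hh
    · -- key h = v : nothing is strictly smaller
      have hnot : ¬ key x < key h := by rcases hx with hx | hx <;> rw [hx, hh] <;> omega
      rw [if_neg hnot]
      have hih := ih h (Or.inl hh) hxs
      unfold pvRunMin at hih
      rw [hih, if_pos hh, if_pos hh]
    · rcases hx with hx | hx
      · -- key x = v < key h = w : x becomes the accumulator and stays first minimal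
        have hlt : key x < key h := by rw [hx, hh]; exact hvw
        rw [if_pos hlt]
        have hih := ih x (Or.inl hx) hxs
        unfold pvRunMin at hih
        rw [hih, if_pos hx]
        have hhv : ¬ key h = v := by rw [hh]; omega
        rw [if_neg hhv, List.find?_cons_of_pos (by simp [hx])]
        simp
      · -- key x = w = key h : accumulator unchanged
        have hnot : ¬ key x < key h := by rw [hx, hh]; omega
        rw [if_neg hnot]
        have hih := ih h (Or.inr hh) hxs
        unfold pvRunMin at hih
        rw [hih]
        have hhv : ¬ key h = v := by rw [hh]; omega
        rw [if_neg hhv, if_neg hhv, List.find?_cons_of_neg (by simp [hx]; omega)]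

-- A's filter-then-[0] is the first matching record.
theorem pv_filter_pyGetD_zero {α : Type} (l : List α) (p : α → Bool) (d : α) :
    PySem.List.pyGetD (l.filter p) 0 d = (l.find? p).getD d := by
  induction l with
  | nil => simp [PySem.List.pyGetD, PySem.List.pyGet?]
  | cons x xs ih =>
    by_cases h : p x <;> simp [h, PySem.List.pyGetD_zero_cons, ih]

theorem pv_contains_iff_find?_isSome (l : List (List (String × String))) (s : String) :
    (PySem.Set.ofList (l.map pvStatus)).contains s = true ↔
      (l.find? (fun ca => pvStatus ca == s)).isSome = true := by
  rw [PySem.Set.contains_iff, PySem.Set.mem_ofList, List.find?_isSome]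
  simp only [List.mem_map, beq_iff_eq]

-- B's adjacent-(0,1) check is false whenever rank 0 or rank 1 is absent from the list
theorem pv_conflict_false (ordered : List (List (String × String)))
    (habs : (∀ ca ∈ ordered, pvRankOf ca ≠ 0) ∨ (∀ ca ∈ ordered, pvRankOf ca ≠ 1)) :
    ((ordered.map (fun ca => pvRankOf ca)).zip
        (PySem.List.slice (ordered.map (fun ca => pvRankOf ca)) (some 1) none)).any
      (fun p => p.1 == 0 && p.2 == 1) = false := by
  rw [List.any_eq_false]
  intro p hp
  have hmem := List.of_mem_zip hp
  have h1 : p.1 ∈ ordered.map (fun ca => pvRankOf ca) := hmem.1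
  have h2 : p.2 ∈ ordered.map (fun ca => pvRankOf ca) := by
    have hd := hmem.2
    rw [show PySem.List.slice (ordered.map (fun ca => pvRankOf ca)) (some 1) none
          = (ordered.map (fun ca => pvRankOf ca)).drop (1 : Int).toNat from
        PySem.List.slice_from _ (by omega)] at hd
    exact List.mem_of_mem_drop hd
  obtain ⟨ca1, hca1, hr1⟩ := List.mem_map.mp h1
  obtain ⟨ca2, hca2, hr2⟩ := List.mem_map.mp h2
  rcases habs with habs | habs
  · have := habs ca1 hca1
    simp [← hr1, this]
  · have := habs ca2 hca2
    simp [← hr2, this]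

-- ===== VERDICT (by name: the statement is the Claim_ definition above) =====
theorem reconcile_component_approvals_py_spec : Claim_equal_reconcile_component_approvals_py := by
  intro name l _hDom hPre
  obtain ⟨hne, _hkeys, hnoconf⟩ := hPre
  unfold Spec_reconcile_component_approvals_py
  unfold reconcile_component_approvals_py reconcile_component_approvals_py_alt
  obtain ⟨x, xs, rfl⟩ : ∃ x xs, l = x :: xs := by
    cases l with
    | nil => exact absurd rfl hne
    | cons x xs => exact ⟨x, xs, rfl⟩
  have hperm := PySem.List.mem_sorted (xs := x :: xs) (key := fun ca => pvRankOf ca) (rev := false)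
  rcases hA : (x :: xs).find? (fun ca => pvStatus ca == "APPROVED") with _ | a <;>
    rcases hR : (x :: xs).find? (fun ca => pvStatus ca == "REJECTED") with _ | r
  · -- neither APPROVED nor REJECTED present: all ranks are 2; sort keeps x first
    have hnA : ∀ ca ∈ (x :: xs), ¬ pvStatus ca = "APPROVED" := by
      intro ca hca
      have := List.find?_eq_none.mp hA ca hca; simpa using this
    have hnR : ∀ ca ∈ (x :: xs), ¬ pvStatus ca = "REJECTED" := by
      intro ca hca
      have := List.find?_eq_none.mp hR ca hca; simpa using this
    have hall2 : ∀ ca ∈ (x :: xs), pvRankOf ca = 2 := by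
      intro ca hca
      rcases pvRankOf_cases ca with h | h | h
      · exact absurd ((pvRankOf_eq_zero_iff ca).mp h) (hnA ca hca)
      · exact absurd ((pvRankOf_eq_one_iff ca).mp h) (hnR ca hca)
      · exact h
    have hc1 : (PySem.Set.ofList ((x :: xs).map pvStatus)).contains "APPROVED" = false := by
      rw [← Bool.not_eq_true, pv_contains_iff_find?_isSome, hA]; simp
    have hc2 : (PySem.Set.ofList ((x :: xs).map pvStatus)).contains "REJECTED" = false := by
      rw [← Bool.not_eq_true, pv_contains_iff_find?_isSome, hR]; simp
    have hconf := pv_conflict_false (PySem.List.sorted (x :: xs) (fun ca => pvRankOf ca))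
      (Or.inl (fun ca hca => by rw [hall2 ca ((hperm ca).mp hca)]; omega))
    obtain ⟨t', ht'⟩ := pv_sorted_cons_head pvRankOf x xs
    have hrm : pvRunMin pvRankOf x xs = x :=
      (pv_runMin_first pvRankOf 2 3 (by omega) xs x
        (Or.inl (hall2 x (by simp)))
        (fun y hy => Or.inl (hall2 y (by simp [hy])))).trans
        (by rw [if_pos (hall2 x (by simp))])
    rw [hrm] at ht'
    rw [ht'] at hconf
    simp only [hc1, hc2, Bool.false_and, Bool.and_false, Bool.false_eq_true, if_false,
      ht', hconf, PySem.List.pyGetD_zero_cons]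
  · -- only REJECTED present: ranks in {1, 2}; head of sort = first REJECTED
    have hnA : ∀ ca ∈ (x :: xs), ¬ pvStatus ca = "APPROVED" := by
      intro ca hca
      have := List.find?_eq_none.mp hA ca hca; simpa using this
    have h12 : ∀ ca ∈ (x :: xs), pvRankOf ca = 1 ∨ pvRankOf ca = 2 := by
      intro ca hca
      rcases pvRankOf_cases ca with h | h | h
      · exact absurd ((pvRankOf_eq_zero_iff ca).mp h) (hnA ca hca)
      · exact Or.inl h
      · exact Or.inr h
    have hc1 : (PySem.Set.ofList ((x :: xs).map pvStatus)).contains "APPROVED" = false := by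
      rw [← Bool.not_eq_true, pv_contains_iff_find?_isSome, hA]; simp
    have hc2 : (PySem.Set.ofList ((x :: xs).map pvStatus)).contains "REJECTED" = true := by
      rw [pv_contains_iff_find?_isSome, hR]; simp
    have hconf := pv_conflict_false (PySem.List.sorted (x :: xs) (fun ca => pvRankOf ca))
      (Or.inl (fun ca hca => by
        rcases h12 ca ((hperm ca).mp hca) with h | h <;> rw [h] <;> omega))
    obtain ⟨t', ht'⟩ := pv_sorted_cons_head pvRankOf x xs
    have hrm := pv_runMin_first pvRankOf 1 2 (by omega) xs x (h12 x (by simp))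
      (fun y hy => h12 y (by simp [hy]))
    have hpred : (fun ca => pvRankOf ca == 1) = (fun ca => pvStatus ca == "REJECTED") := by
      funext ca
      exact Bool.eq_iff_iff.mpr (by simp [pvRankOf_eq_one_iff])
    rw [hpred] at hrm
    by_cases hx1 : pvRankOf x = 1
    · have hxr : pvStatus x = "REJECTED" := (pvRankOf_eq_one_iff x).mp hx1
      rw [if_pos hx1] at hrm
      rw [hrm] at ht'
      rw [ht'] at hconf
      simp only [hc1, hc2, Bool.and_false, Bool.false_eq_true, if_false, if_true,
        ht', hconf, PySem.List.pyGetD_zero_cons, pv_filter_pyGetD_zero]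
      rw [List.find?_cons_of_pos (by simp [hxr]), Option.getD_some]
    · have hxr : ¬ pvStatus x = "REJECTED" := fun h => hx1 ((pvRankOf_eq_one_iff x).mpr h)
      have hRtail : xs.find? (fun ca => pvStatus ca == "REJECTED") = some r := by
        rw [List.find?_cons_of_neg (by simp [hxr])] at hR
        exact hR
      rw [if_neg hx1, hRtail, Option.getD_some] at hrm
      rw [hrm] at ht'
      rw [ht'] at hconf
      simp only [hc1, hc2, Bool.and_false, Bool.false_eq_true, if_false, if_true,
        ht', hconf, PySem.List.pyGetD_zero_cons, pv_filter_pyGetD_zero, hR, Option.getD_some]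
  · -- only APPROVED present: ranks in {0, 2}; head of sort = first APPROVED
    have hnR : ∀ ca ∈ (x :: xs), ¬ pvStatus ca = "REJECTED" := by
      intro ca hca
      have := List.find?_eq_none.mp hR ca hca; simpa using this
    have h02 : ∀ ca ∈ (x :: xs), pvRankOf ca = 0 ∨ pvRankOf ca = 2 := by
      intro ca hca
      rcases pvRankOf_cases ca with h | h | h
      · exact Or.inl h
      · exact absurd ((pvRankOf_eq_one_iff ca).mp h) (hnR ca hca)
      · exact Or.inr h
    have hc1 : (PySem.Set.ofList ((x :: xs).map pvStatus)).contains "APPROVED" = true := by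
      rw [pv_contains_iff_find?_isSome, hA]; simp
    have hc2 : (PySem.Set.ofList ((x :: xs).map pvStatus)).contains "REJECTED" = false := by
      rw [← Bool.not_eq_true, pv_contains_iff_find?_isSome, hR]; simp
    have hconf := pv_conflict_false (PySem.List.sorted (x :: xs) (fun ca => pvRankOf ca))
      (Or.inr (fun ca hca => by
        rcases h02 ca ((hperm ca).mp hca) with h | h <;> rw [h] <;> omega))
    obtain ⟨t', ht'⟩ := pv_sorted_cons_head pvRankOf x xs
    have hrm := pv_runMin_first pvRankOf 0 2 (by omega) xs x (h02 x (by simp))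
      (fun y hy => h02 y (by simp [hy]))
    have hpred : (fun ca => pvRankOf ca == 0) = (fun ca => pvStatus ca == "APPROVED") := by
      funext ca
      exact Bool.eq_iff_iff.mpr (by simp [pvRankOf_eq_zero_iff])
    rw [hpred] at hrm
    by_cases hx0 : pvRankOf x = 0
    · have hxa : pvStatus x = "APPROVED" := (pvRankOf_eq_zero_iff x).mp hx0
      rw [if_pos hx0] at hrm
      rw [hrm] at ht'
      rw [ht'] at hconf
      simp only [hc1, hc2, Bool.false_and, Bool.false_eq_true, if_false, if_true,
        ht', hconf, PySem.List.pyGetD_zero_cons, pv_filter_pyGetD_zero]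
      rw [List.find?_cons_of_pos (by simp [hxa]), Option.getD_some]
    · have hxa : ¬ pvStatus x = "APPROVED" := fun h => hx0 ((pvRankOf_eq_zero_iff x).mpr h)
      have hAtail : xs.find? (fun ca => pvStatus ca == "APPROVED") = some a := by
        rw [List.find?_cons_of_neg (by simp [hxa])] at hA
        exact hA
      rw [if_neg hx0, hAtail, Option.getD_some] at hrm
      rw [hrm] at ht'
      rw [ht'] at hconf
      simp only [hc1, hc2, Bool.false_and, Bool.false_eq_true, if_false, if_true,
        ht', hconf, PySem.List.pyGetD_zero_cons, pv_filter_pyGetD_zero, hA, Option.getD_some]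
  · -- both present: contradicts Pre_
    exfalso
    apply hnoconf
    refine ⟨⟨a, List.mem_of_find?_eq_some hA, by simpa using List.find?_some hA⟩,
            ⟨r, List.mem_of_find?_eq_some hR, by simpa using List.find?_some hR⟩⟩
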